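-- pv_equiv track=rewrite | github.com/jrplatin/CIS519-Homework | hw2.py | extract_features_test
-- ===== SOURCE A (Python) =====
-- def extract_features_test(train_data1, train_features):
--     news_dev_x = []
--     for sentence in train_data1:
--         padded = sentence[:]
--         padded.insert(0, ('SSS', None))
--         padded.insert(0, ('SSS', None))
--         padded.insert(0, ('SSS', None))
--         padded.append(('EEE', None))
--         padded.append(('EEE', None))
--         padded.append(('EEE', None))
--         for i in range(3,len(padded)-3):
--             feat1 = 'w-3='+str(padded[i-3][0])
--             feat2 = 'w-2='+str(padded[i-2][0])
--             feat3 = 'w-1='+str(padded[i-1][0])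
--             feat4 = 'w+1='+str(padded[i+1][0])
--             feat5 = 'w+2='+str(padded[i+2][0])
--             feat6 = 'w+3='+str(padded[i+3][0])
--             feat7 = 'w-1&w-2='+str(padded[i-1][0])+ ' ' +str(padded[i-2][0])
--             feat8 = 'w+1&w+2='+str(padded[i+1][0])+ ' ' + str(padded[i+2][0])
--             feat9 = 'w-1&w+1='+str(padded[i-1][0])+ ' ' + str(padded[i+1][0])
--             feats = [feat1, feat2, feat3, feat4, feat5, feat6, feat7, feat8, feat9]
--             feats = {feature:1 for feature in feats if feature in train_features}
--             news_dev_x.append(feats)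
--     return news_dev_x
-- ===== SOURCE B (Python) =====
-- def extract_features_test(train_data1, train_features):
--     out = []
--     for sentence in train_data1:
--         words = [str(w) for (w, _t) in sentence]
--         n = len(words)
--
--         def col(d):
--             # column of context words at offset d: col(d)[i] == word at position i+d,
--             # 'SSS' before the sentence, 'EEE' after it
--             if d < 0:
--                 return ['SSS'] * min(n, -d) + words[:max(0, n + d)]
--             return words[d:] + ['EEE'] * min(n, d)
--
--         for m3, m2, m1, p1, p2, p3 in zip(col(-3), col(-2), col(-1), col(1), col(2), col(3)):
--             feats = ['w-3=' + m3, 'w-2=' + m2, 'w-1=' + m1,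
--                      'w+1=' + p1, 'w+2=' + p2, 'w+3=' + p3,
--                      'w-1&w-2=' + m1 + ' ' + m2,
--                      'w+1&w+2=' + p1 + ' ' + p2,
--                      'w-1&w+1=' + m1 + ' ' + p1]
--             out.append({f: 1 for f in feats if f in train_features})
--     return out
-- ===== Notes on version B (the rewrite author's own statement) =====
-- stated objective: alternative
-- what changed: B replaces A's padded-list-with-random-access loop by a columnar pass: it builds six shifted context columns per sentence via slicing/replication (no padded copy, no per-token index arithmetic) and zips them into rows.
import Mathlib
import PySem

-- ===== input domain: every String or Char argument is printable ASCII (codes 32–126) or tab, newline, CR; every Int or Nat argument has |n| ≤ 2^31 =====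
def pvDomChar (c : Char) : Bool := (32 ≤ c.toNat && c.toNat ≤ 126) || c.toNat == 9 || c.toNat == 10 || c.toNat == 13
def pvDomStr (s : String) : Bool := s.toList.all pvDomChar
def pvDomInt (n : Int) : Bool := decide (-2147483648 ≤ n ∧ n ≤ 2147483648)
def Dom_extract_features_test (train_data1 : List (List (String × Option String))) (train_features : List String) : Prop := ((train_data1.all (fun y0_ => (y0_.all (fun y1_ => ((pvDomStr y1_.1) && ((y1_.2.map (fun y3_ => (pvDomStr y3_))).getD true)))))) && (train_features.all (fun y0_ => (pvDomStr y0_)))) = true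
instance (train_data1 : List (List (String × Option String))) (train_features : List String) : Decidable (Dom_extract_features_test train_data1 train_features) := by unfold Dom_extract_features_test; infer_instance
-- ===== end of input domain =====

-- B (alternative): instead of A's padded copy with random access, B builds six shifted context columns per sentence by slicing/replication and zips them into the feature rows.



-- ===== PORT A =====
-- A-side helper: str(padded[j][0]); index is always in range in A's loop, getD "" only totalizes.
def eftPadGet (padded : List (String × Option String)) (j : Int) : String :=
  ((PySem.List.pyGet? padded j).map Prod.fst).getD ""

-- shared: the dict comprehension {f: 1 for f in feats if f in train_features} (identical line in A and B)
def eftRowDict (train_features : List String) (feats : List String) : List (String × Int) :=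
  (feats.foldl (fun d f => if train_features.contains f then d.insert f (1 : Int) else d)
    (PySem.Dict.empty : PySem.Dict String Int)).items

def extract_features_test (train_data1 : List (List (String × Option String))) (train_features : List String) : List (List (String × Int)) :=
  train_data1.foldl (fun news_dev_x sentence =>
    -- padded = sentence[:]; three insert(0, ('SSS', None)); three append(('EEE', None))
    let padded : List (String × Option String) :=
      ("SSS", none) :: ("SSS", none) :: ("SSS", none) ::
        (sentence ++ [("EEE", none), ("EEE", none), ("EEE", none)])
    (PySem.List.pyRange 3 ((padded.length : Int) - 3) 1).foldl (fun acc i =>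
      let feat1 := "w-3=" ++ eftPadGet padded (i - 3)
      let feat2 := "w-2=" ++ eftPadGet padded (i - 2)
      let feat3 := "w-1=" ++ eftPadGet padded (i - 1)
      let feat4 := "w+1=" ++ eftPadGet padded (i + 1)
      let feat5 := "w+2=" ++ eftPadGet padded (i + 2)
      let feat6 := "w+3=" ++ eftPadGet padded (i + 3)
      let feat7 := "w-1&w-2=" ++ eftPadGet padded (i - 1) ++ " " ++ eftPadGet padded (i - 2)
      let feat8 := "w+1&w+2=" ++ eftPadGet padded (i + 1) ++ " " ++ eftPadGet padded (i + 2)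
      let feat9 := "w-1&w+1=" ++ eftPadGet padded (i - 1) ++ " " ++ eftPadGet padded (i + 1)
      acc ++ [eftRowDict train_features [feat1, feat2, feat3, feat4, feat5, feat6, feat7, feat8, feat9]])
      news_dev_x) []

-- ===== PORT B =====
-- B-side helper: col(d) from Source B — the context column at offset d, built by slicing/replication.
-- words[:k] with k = max(0, n+d) ≥ 0 is List.take, words[d:] with d ≥ 0 is List.drop (exact here).
def eftCol (words : List String) (d : Int) : List String :=
  if d < 0 then
    List.replicate (min (words.length : Int) (-d)).toNat "SSS"
      ++ words.take (max 0 ((words.length : Int) + d)).toNat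
  else
    words.drop d.toNat ++ List.replicate (min (words.length : Int) d).toNat "EEE"

-- B-side helper: the zip loop of Source B — consume the six columns in lockstep (zip truncates at the shortest).
def eftRows (tf : List String) : List String → List String → List String → List String → List String → List String → List (List (String × Int))
  | m3 :: r3, m2 :: r2, m1 :: r1, p1 :: q1, p2 :: q2, p3 :: q3 =>
      eftRowDict tf
        [ "w-3=" ++ m3, "w-2=" ++ m2, "w-1=" ++ m1
        , "w+1=" ++ p1, "w+2=" ++ p2, "w+3=" ++ p3
        , "w-1&w-2=" ++ m1 ++ " " ++ m2
        , "w+1&w+2=" ++ p1 ++ " " ++ p2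
        , "w-1&w+1=" ++ m1 ++ " " ++ p1 ]
        :: eftRows tf r3 r2 r1 q1 q2 q3
  | _, _, _, _, _, _ => []

def extract_features_test_alt (train_data1 : List (List (String × Option String))) (train_features : List String) : List (List (String × Int)) :=
  train_data1.foldl (fun out sentence =>
    let words := sentence.map (fun wt => wt.1)   -- str(w) on a string is the string itself
    out ++ eftRows train_features (eftCol words (-3)) (eftCol words (-2)) (eftCol words (-1))
            (eftCol words 1) (eftCol words 2) (eftCol words 3)) []

-- ===== PRECONDITION & SPEC =====
def Spec_extract_features_test (train_data1 : List (List (String × Option String))) (train_features : List String) (out : List (List (String × Int))) : Prop := out = extract_features_test_alt train_data1 train_features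
instance (train_data1 : List (List (String × Option String))) (train_features : List String) (out : List (List (String × Int))) : Decidable (Spec_extract_features_test train_data1 train_features out) := by unfold Spec_extract_features_test; infer_instance

-- ===== CLAIM =====
def Claim_equal_extract_features_test : Prop := ∀ (train_data1 : List (List (String × Option String))) (train_features : List String), Dom_extract_features_test train_data1 train_features → Spec_extract_features_test train_data1 train_features (extract_features_test train_data1 train_features)

-- ===== LEMMAS AND PROOFS =====

-- proof-side helpers: the "word at offset" view both programs compute
def eftWord (sentence : List (String × Option String)) (j : Int) : String :=
  if j < 0 then "SSS"
  else if (sentence.length : Int) ≤ j then "EEE"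
  else ((PySem.List.pyGet? sentence j).map Prod.fst).getD ""

def eftRow (sentence : List (String × Option String)) (train_features : List String) (i : Int) : List (String × Int) :=
  eftRowDict train_features
    [ "w-3=" ++ eftWord sentence (i - 3)
    , "w-2=" ++ eftWord sentence (i - 2)
    , "w-1=" ++ eftWord sentence (i - 1)
    , "w+1=" ++ eftWord sentence (i + 1)
    , "w+2=" ++ eftWord sentence (i + 2)
    , "w+3=" ++ eftWord sentence (i + 3)
    , "w-1&w-2=" ++ eftWord sentence (i - 1) ++ " " ++ eftWord sentence (i - 2)
    , "w+1&w+2=" ++ eftWord sentence (i + 1) ++ " " ++ eftWord sentence (i + 2)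
    , "w-1&w+1=" ++ eftWord sentence (i - 1) ++ " " ++ eftWord sentence (i + 1) ]

lemma eft_range_shift (n : Nat) :
    PySem.List.pyRange 3 ((n : Int) + 3) 1 = (PySem.List.pyRange 0 (n : Int) 1).map (· + 3) := by
  induction n with
  | zero => simp [PySem.List.pyRange_one_eq_nil]
  | succ n ih =>
    have h1 : ((n : Int) + 1) + 3 = ((n : Int) + 3) + 1 := by ring
    have h2 : ((n + 1 : Nat) : Int) = (n : Int) + 1 := by push_cast; ring
    rw [h2, h1, PySem.List.pyRange_one_succ_right (by omega),
        PySem.List.pyRange_one_succ_right (by omega), List.map_append, ih]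
    simp

lemma eft_pad_get (sentence : List (String × Option String)) (j : Int)
    (h1 : -3 ≤ j) (h2 : j < (sentence.length : Int) + 3) :
    eftPadGet (("SSS", none) :: ("SSS", none) :: ("SSS", none) ::
        (sentence ++ [("EEE", none), ("EEE", none), ("EEE", none)])) (j + 3)
      = eftWord sentence j := by
  unfold eftPadGet eftWord
  rw [PySem.List.pyGet?_of_nonneg _ (by omega)]
  by_cases hneg : j < 0
  · have : (j + 3).toNat = 0 ∨ (j + 3).toNat = 1 ∨ (j + 3).toNat = 2 := by omega
    rcases this with h | h | h <;> simp [h, hneg]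
  · rw [not_lt] at hneg
    have ht : (j + 3).toNat = j.toNat + 3 := by omega
    rw [ht]
    simp only [List.getElem?_cons_succ]
    by_cases hin : (sentence.length : Int) ≤ j
    · have hge : sentence.length ≤ j.toNat := by omega
      rw [List.getElem?_append_right hge]
      have : j.toNat - sentence.length = 0 ∨ j.toNat - sentence.length = 1 ∨
          j.toNat - sentence.length = 2 := by omega
      rcases this with h | h | h <;> simp [h, hneg, hin]
    · rw [not_le] at hin
      have hlt : j.toNat < sentence.length := by omega
      rw [List.getElem?_append_left hlt,
          PySem.List.pyGet?_of_nonneg _ (by omega : (0:Int) ≤ j)]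
      simp [hneg, not_le.mpr hin]

lemma eft_row_eq (sentence : List (String × Option String)) (train_features : List String)
    (i : Int) (h0 : 0 ≤ i) (hn : i < (sentence.length : Int)) :
    (let padded : List (String × Option String) :=
      ("SSS", none) :: ("SSS", none) :: ("SSS", none) ::
        (sentence ++ [("EEE", none), ("EEE", none), ("EEE", none)])
     eftRowDict train_features
      [ "w-3=" ++ eftPadGet padded (i + 3 - 3)
      , "w-2=" ++ eftPadGet padded (i + 3 - 2)
      , "w-1=" ++ eftPadGet padded (i + 3 - 1)
      , "w+1=" ++ eftPadGet padded (i + 3 + 1)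
      , "w+2=" ++ eftPadGet padded (i + 3 + 2)
      , "w+3=" ++ eftPadGet padded (i + 3 + 3)
      , "w-1&w-2=" ++ eftPadGet padded (i + 3 - 1) ++ " " ++ eftPadGet padded (i + 3 - 2)
      , "w+1&w+2=" ++ eftPadGet padded (i + 3 + 1) ++ " " ++ eftPadGet padded (i + 3 + 2)
      , "w-1&w+1=" ++ eftPadGet padded (i + 3 - 1) ++ " " ++ eftPadGet padded (i + 3 + 1) ])
      = eftRow sentence train_features i := by
  have e3 : i + 3 - 3 = (i - 3) + 3 := by ring
  have e2 : i + 3 - 2 = (i - 2) + 3 := by ring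
  have e1 : i + 3 - 1 = (i - 1) + 3 := by ring
  have p1 : i + 3 + 1 = (i + 1) + 3 := by ring
  have p2 : i + 3 + 2 = (i + 2) + 3 := by ring
  simp only [e3, e2, e1, p1, p2,
    eft_pad_get sentence (i - 3) (by omega) (by omega),
    eft_pad_get sentence (i - 2) (by omega) (by omega),
    eft_pad_get sentence (i - 1) (by omega) (by omega),
    eft_pad_get sentence (i + 1) (by omega) (by omega),
    eft_pad_get sentence (i + 2) (by omega) (by omega),
    eft_pad_get sentence (i + 3) (by omega) (by omega)]
  rfl

-- column facts
lemma eftCol_length (words : List String) (d : Int) : (eftCol words d).length = words.length := by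
  unfold eftCol
  split_ifs with h
  · simp; omega
  · simp; omega

lemma eftCol_getElem (sentence : List (String × Option String)) (d : Int) (i : Nat)
    (hi : i < sentence.length) :
    (eftCol (sentence.map (fun wt => wt.1)) d)[i]? = some (eftWord sentence ((i : Int) + d)) := by
  unfold eftCol eftWord
  have hlen : (sentence.map (fun wt => wt.1)).length = sentence.length := by simp
  by_cases hd : d < 0
  · rw [if_pos hd]
    by_cases hneg : (i : Int) + d < 0
    · rw [List.getElem?_append_left (by simp [hlen]; omega)]
      rw [if_pos hneg]
      rw [List.getElem?_replicate]
      rw [if_pos (by omega)]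
    · rw [List.getElem?_append_right (by simp [hlen]; omega)]
      rw [if_neg hneg, if_neg (by omega)]
      rw [PySem.List.pyGet?_of_nonneg _ (by omega)]
      rw [List.getElem?_take]
      simp only [List.length_replicate, hlen]
      rw [if_pos (by omega)]
      have e : i - (min (sentence.length : Int) (-d)).toNat = ((i : Int) + d).toNat := by omega
      rw [e, List.getElem?_map]
      cases h : sentence[((i : Int) + d).toNat]? with
      | none => exact absurd (List.getElem?_eq_none_iff.mp h) (by omega)
      | some v => simp
  · rw [if_neg hd]
    rw [not_lt] at hd
    by_cases hbig : (sentence.length : Int) ≤ (i : Int) + d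
    · rw [List.getElem?_append_right (by simp [hlen]; omega)]
      rw [if_neg (by omega), if_pos hbig]
      rw [List.getElem?_replicate]
      simp only [List.length_drop, hlen]
      rw [if_pos (by omega)]
    · rw [List.getElem?_append_left (by simp [hlen]; omega)]
      rw [if_neg (by omega), if_neg hbig]
      rw [PySem.List.pyGet?_of_nonneg _ (by omega)]
      rw [List.getElem?_drop]
      have e : d.toNat + i = ((i : Int) + d).toNat := by omega
      rw [e, List.getElem?_map]
      cases h : sentence[((i : Int) + d).toNat]? with
      | none => exact absurd (List.getElem?_eq_none_iff.mp h) (by omega)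
      | some v => simp

-- the zip loop over six length-n lists is the index map over range n
lemma eftRows_eq_map (tf : List String) :
    ∀ (n : Nat) (a b c d e f : List String),
      a.length = n → b.length = n → c.length = n → d.length = n → e.length = n → f.length = n →
      eftRows tf a b c d e f = (List.range n).map (fun i =>
        eftRowDict tf
          [ "w-3=" ++ a.getD i "", "w-2=" ++ b.getD i "", "w-1=" ++ c.getD i ""
          , "w+1=" ++ d.getD i "", "w+2=" ++ e.getD i "", "w+3=" ++ f.getD i ""
          , "w-1&w-2=" ++ c.getD i "" ++ " " ++ b.getD i ""
          , "w+1&w+2=" ++ d.getD i "" ++ " " ++ e.getD i ""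
          , "w-1&w+1=" ++ c.getD i "" ++ " " ++ d.getD i "" ]) := by
  intro n
  induction n with
  | zero =>
    intro a b c d e f ha hb hc hd he hf
    rw [List.eq_nil_of_length_eq_zero ha, List.eq_nil_of_length_eq_zero hb,
        List.eq_nil_of_length_eq_zero hc, List.eq_nil_of_length_eq_zero hd,
        List.eq_nil_of_length_eq_zero he, List.eq_nil_of_length_eq_zero hf]
    rfl
  | succ n ih =>
    intro a b c d e f ha hb hc hd he hf
    obtain ⟨a0, a', rfl⟩ := List.exists_cons_of_length_eq_add_one ha
    obtain ⟨b0, b', rfl⟩ := List.exists_cons_of_length_eq_add_one hb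
    obtain ⟨c0, c', rfl⟩ := List.exists_cons_of_length_eq_add_one hc
    obtain ⟨d0, d', rfl⟩ := List.exists_cons_of_length_eq_add_one hd
    obtain ⟨e0, e', rfl⟩ := List.exists_cons_of_length_eq_add_one he
    obtain ⟨f0, f', rfl⟩ := List.exists_cons_of_length_eq_add_one hf
    rw [List.range_succ_eq_map, List.map_cons, List.map_map]
    simp only [eftRows]
    congr 1
    rw [ih a' b' c' d' e' f' (by simpa using ha) (by simpa using hb) (by simpa using hc)
        (by simpa using hd) (by simpa using he) (by simpa using hf)]
    apply List.map_congr_left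
    intro i _
    rfl

lemma eft_range_cast (n : Nat) :
    PySem.List.pyRange 0 (n : Int) 1 = (List.range n).map (fun (i : Nat) => (i : Int)) := by
  rw [PySem.List.pyRange_one]
  simp only [Int.sub_zero, Int.toNat_natCast]
  exact List.map_congr_left (fun a _ => by simp)

lemma eft_sentence_eq (s : List (String × Option String)) (tf : List String) :
    eftRows tf (eftCol (s.map (fun wt => wt.1)) (-3)) (eftCol (s.map (fun wt => wt.1)) (-2))
        (eftCol (s.map (fun wt => wt.1)) (-1)) (eftCol (s.map (fun wt => wt.1)) 1)
        (eftCol (s.map (fun wt => wt.1)) 2) (eftCol (s.map (fun wt => wt.1)) 3)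
      = (PySem.List.pyRange 0 (s.length : Int) 1).map (eftRow s tf) := by
  have hl : (s.map (fun wt => wt.1)).length = s.length := by simp
  rw [eft_range_cast, List.map_map,
      eftRows_eq_map tf s.length _ _ _ _ _ _
        ((eftCol_length _ _).trans hl) ((eftCol_length _ _).trans hl)
        ((eftCol_length _ _).trans hl) ((eftCol_length _ _).trans hl)
        ((eftCol_length _ _).trans hl) ((eftCol_length _ _).trans hl)]
  apply List.map_congr_left
  intro i hi
  have hi' : i < s.length := List.mem_range.mp hi
  have g : ∀ d : Int, (eftCol (s.map (fun wt => wt.1)) d).getD i "" = eftWord s ((i : Int) + d) := by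
    intro d
    rw [List.getD_eq_getElem?_getD, eftCol_getElem s d i hi']
    rfl
  show _ = eftRow s tf (i : Int)
  unfold eftRow
  rw [g (-3), g (-2), g (-1), g 1, g 2, g 3]
  have m3 : (i : Int) + (-3) = (i : Int) - 3 := by ring
  have m2 : (i : Int) + (-2) = (i : Int) - 2 := by ring
  have m1 : (i : Int) + (-1) = (i : Int) - 1 := by ring
  rw [m3, m2, m1]

-- ===== VERDICT =====
theorem extract_features_test_spec : Claim_equal_extract_features_test := by
  intro train_data1 train_features _dom
  unfold Spec_extract_features_test extract_features_test extract_features_test_alt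
  have hstep :
      (fun (news_dev_x : List (List (String × Int))) (sentence : List (String × Option String)) =>
        let padded : List (String × Option String) :=
          ("SSS", none) :: ("SSS", none) :: ("SSS", none) ::
            (sentence ++ [("EEE", none), ("EEE", none), ("EEE", none)])
        (PySem.List.pyRange 3 ((padded.length : Int) - 3) 1).foldl (fun acc i =>
          let feat1 := "w-3=" ++ eftPadGet padded (i - 3)
          let feat2 := "w-2=" ++ eftPadGet padded (i - 2)
          let feat3 := "w-1=" ++ eftPadGet padded (i - 1)
          let feat4 := "w+1=" ++ eftPadGet padded (i + 1)
          let feat5 := "w+2=" ++ eftPadGet padded (i + 2)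
          let feat6 := "w+3=" ++ eftPadGet padded (i + 3)
          let feat7 := "w-1&w-2=" ++ eftPadGet padded (i - 1) ++ " " ++ eftPadGet padded (i - 2)
          let feat8 := "w+1&w+2=" ++ eftPadGet padded (i + 1) ++ " " ++ eftPadGet padded (i + 2)
          let feat9 := "w-1&w+1=" ++ eftPadGet padded (i - 1) ++ " " ++ eftPadGet padded (i + 1)
          acc ++ [eftRowDict train_features [feat1, feat2, feat3, feat4, feat5, feat6, feat7, feat8, feat9]])
          news_dev_x)
      = (fun out sentence =>
          let words := sentence.map (fun wt => wt.1)
          out ++ eftRows train_features (eftCol words (-3)) (eftCol words (-2)) (eftCol words (-1))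
                  (eftCol words 1) (eftCol words 2) (eftCol words 3)) := by
    funext acc sentence
    simp only [PySem.List.foldl_append_singleton_eq_map]
    rw [eft_sentence_eq sentence train_features]
    congr 1
    have hlen : ((("SSS", (none : Option String)) :: ("SSS", none) :: ("SSS", none) ::
        (sentence ++ [("EEE", none), ("EEE", none), ("EEE", none)])).length : Int) - 3
        = (sentence.length : Int) + 3 := by
      simp; omega
    rw [hlen, eft_range_shift sentence.length, List.map_map]
    apply List.map_congr_left
    intro i hi
    have := (PySem.List.mem_pyRange_one).mp hi
    simpa using eft_row_eq sentence train_features i (by omega) (by omega)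
  rw [hstep]
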